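-- pv_equiv track=rewrite | github.com/strogonoff/django-tagging-machinetags | tagging/utils.py | build_tag
-- ===== SOURCE A (Python) =====
-- def build_tag(tokens, default_namespace=None, keep_quotes=None):
--     """
--     Gets a list of strings and chars and builds a tag with correctly quoted
--     namespace, name and values. If there is no namespace or value these parts
--     will be ignored.
--
--     If no namespace was found and the ``default_namespace`` is given, the tag
--     gets the default namespace. The default namespace is not applied if an empty
--     namespace was found (like ``:name``).
--     """
--     if keep_quotes is None:
--         keep_quotes = ()
--     left, lms, middle, mrs, right = [], None, [], None, []
--     if ':' not in tokens and '=' not in tokens: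
--         word = normalize_tag_part(''.join(tokens), keep_quotes=keep_quotes)
--         if word and default_namespace:
--             word = '%s:%s' % (default_namespace, word)
--         return word
--     for token in tokens:
--         if lms is None:
--             if token == ':':
--                 lms = ':'
--             elif token == '=':
--                 if left:
--                     lms = '='
--             else:
--                 left.append(token)
--         elif lms == ':':
--             if mrs is None:
--                 if token == '=':
--                     if middle:
--                         mrs = '='
--                 else:
--                     middle.append(token)
--             else:
--                 right.append(token)
--         elif lms == '=':
--             middle.append(token)
--     if default_namespace:
--         empty_or_default_namespace = [default_namespace]
--     else:
--         empty_or_default_namespace = []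
--     if lms == '=':
--         namespace, name, value = empty_or_default_namespace, left, middle
--     else:
--         # lms == ':'
--         if middle:
--             namespace, name, value = left, middle, right
--         # not lms
--         else:
--             namespace, name, value = empty_or_default_namespace, left, []
--     name = normalize_tag_part(''.join(name), keep_quotes=keep_quotes)
--     if not name:
--         return ''
--     namespace = normalize_tag_part(''.join(namespace), keep_quotes=keep_quotes)
--     value = normalize_tag_part(''.join(value), keep_quotes=keep_quotes)
--     if namespace:
--         name = "%s:%s" % (namespace, name)
--     if value:
--         name = "%s=%s" % (name, value)
--     return name
--
-- def normalize_tag_part(input, stop_chars=':=', keep_quotes=None):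
--     """
--     Takes a namespace, name or value and removes trailing colons and equals.
--     Adds quotes around each part that contains a colon or equals sign.
--     """
--     if keep_quotes:
--         for part in keep_quotes:
--             if input == '"%s"' % part:
--                 return input
--     input = input.replace('"', '')
--     if not input:
--         return ''
--     for char in stop_chars:
--         if char in input:
--             return '"%s"' % input
--     return input
-- ===== SOURCE B (Python) =====
-- # B: classify the tag shape by computing split indices on an '='-stripped body
-- # and slicing, instead of threading lms/mrs state token-by-token as A does.
--
-- def normalize_tag_part(input, stop_chars=':=', keep_quotes=None):
--     if keep_quotes:
--         for part in keep_quotes: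
--             if input == '"%s"' % part:
--                 return input
--     input = input.replace('"', '')
--     if not input:
--         return ''
--     for char in stop_chars:
--         if char in input:
--             return '"%s"' % input
--     return input
--
--
-- def _skip_eq(toks):
--     """Drop the leading '=' tokens (they never count as a delimiter)."""
--     n = 0
--     while n < len(toks) and toks[n] == '=':
--         n += 1
--     return toks[n:]
--
--
-- def _finish(namespace, name, value, keep_quotes):
--     """Join, normalize and assemble the three parts."""
--     name = normalize_tag_part(''.join(name), keep_quotes=keep_quotes)
--     if not name:
--         return ''
--     namespace = normalize_tag_part(''.join(namespace), keep_quotes=keep_quotes)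
--     value = normalize_tag_part(''.join(value), keep_quotes=keep_quotes)
--     if namespace:
--         name = '%s:%s' % (namespace, name)
--     if value:
--         name = '%s=%s' % (name, value)
--     return name
--
--
-- def build_tag(tokens, default_namespace=None, keep_quotes=None):
--     if keep_quotes is None:
--         keep_quotes = ()
--     if ':' not in tokens and '=' not in tokens:
--         word = normalize_tag_part(''.join(tokens), keep_quotes=keep_quotes)
--         if word and default_namespace:
--             word = '%s:%s' % (default_namespace, word)
--         return word
--
--     ns_parts = [default_namespace] if default_namespace else []
--     body = _skip_eq(tokens)
--     big = len(body) + 1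
--     ci = body.index(':') if ':' in body else big
--     ei = body.index('=') if '=' in body else big
--     if ci < ei:
--         # namespace:name[=value] shape (when a name follows the colon)
--         left, tbody = body[:ci], _skip_eq(body[ci + 1:])
--         if tbody:
--             mi = tbody.index('=') if '=' in tbody else len(tbody)
--             return _finish(left, tbody[:mi], tbody[mi + 1:], keep_quotes)
--         return _finish(ns_parts, left, [], keep_quotes)
--     if ei < big:
--         # name=value shape: everything after the first counting '=' is value
--         return _finish(ns_parts, body[:ei], body[ei + 1:], keep_quotes)
--     # no counting delimiter at all
--     return _finish(ns_parts, body, [], keep_quotes)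
-- ===== Notes on version B (the rewrite author's own statement) =====
-- stated objective: alternative
-- what changed: Replaces A's token-by-token state machine (threading left/lms/middle/mrs/right through the loop) by computing the first counting ':' and '=' split indices on an '='-stripped body, classifying the tag shape once and slicing the token list into namespace/name/value sublists.
import Mathlib
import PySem

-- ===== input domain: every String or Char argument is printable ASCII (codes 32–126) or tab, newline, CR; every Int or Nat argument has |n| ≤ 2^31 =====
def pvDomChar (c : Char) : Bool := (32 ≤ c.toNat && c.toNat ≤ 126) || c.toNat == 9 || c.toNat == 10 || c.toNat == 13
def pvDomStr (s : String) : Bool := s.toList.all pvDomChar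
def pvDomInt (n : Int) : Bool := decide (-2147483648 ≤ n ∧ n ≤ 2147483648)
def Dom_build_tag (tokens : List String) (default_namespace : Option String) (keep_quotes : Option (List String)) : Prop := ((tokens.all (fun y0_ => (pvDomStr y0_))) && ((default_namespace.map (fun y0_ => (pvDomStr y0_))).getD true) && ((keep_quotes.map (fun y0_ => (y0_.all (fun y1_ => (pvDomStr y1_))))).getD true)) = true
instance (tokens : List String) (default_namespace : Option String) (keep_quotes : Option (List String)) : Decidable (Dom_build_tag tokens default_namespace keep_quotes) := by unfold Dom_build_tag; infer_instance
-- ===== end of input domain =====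

-- B replaces A's token-by-token lms/mrs state machine by computing the split
-- indices of the first counting ':' / '=' on an '='-stripped body and slicing;
-- objective: alternative decomposition, same cost.

-- ===== PORT A =====
-- shared module helper normalize_tag_part (stop_chars fixed at its default ':=');
-- the keep_quotes loop is List.find? (first matching part), '"%s"' % x is quote ++ x ++ quote
def normalize_tag_part (inp : String) (keep_quotes : List String) : String :=
  match keep_quotes.find? (fun part => inp == "\"" ++ part ++ "\"") with
  | some _ => inp
  | none =>
    let i := PySem.Str.replace inp "\"" ""
    if i = "" then ""
    else
      match (":=".toList).find? (fun c => PySem.Str.isIn (String.ofList [c]) i) with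
      | some _ => "\"" ++ i ++ "\""
      | none => i

-- Python truthiness of the optional default_namespace string
def truthyStrOpt : Option String → Bool
  | none => false
  | some s => s != ""

-- '[default_namespace] if default_namespace else []'
def nsDefault : Option String → List String
  | none => []
  | some s => if s = "" then [] else [s]

abbrev TagSt := List String × Option String × List String × Option String × List String

-- the body of A's 'for token in tokens' loop, on state (left, lms, middle, mrs, right)
def stepA (st : TagSt) (token : String) : TagSt :=
  match st with
  | (left, lms, middle, mrs, right) =>
    match lms with
    | none =>
      if token = ":" then (left, some ":", middle, mrs, right)
      else if token = "=" then
        if left ≠ [] then (left, some "=", middle, mrs, right)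
        else (left, lms, middle, mrs, right)
      else (left ++ [token], lms, middle, mrs, right)
    | some l =>
      if l = ":" then
        match mrs with
        | none =>
          if token = "=" then
            if middle ≠ [] then (left, lms, middle, some "=", right)
            else (left, lms, middle, mrs, right)
          else (left, lms, middle ++ [token], mrs, right)
        | some _ => (left, lms, middle, mrs, right ++ [token])
      else if l = "=" then (left, lms, middle ++ [token], mrs, right)
      else (left, lms, middle, mrs, right)

def build_tag (tokens : List String) (default_namespace : Option String) (keep_quotes : Option (List String)) : String :=
  let kq := keep_quotes.getD []
  if ¬ tokens.contains ":" ∧ ¬ tokens.contains "=" then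
    let word := normalize_tag_part (PySem.Str.join "" tokens) kq
    if word ≠ "" ∧ truthyStrOpt default_namespace then
      (default_namespace.getD "") ++ ":" ++ word
    else word
  else
    match tokens.foldl stepA ([], none, [], none, []) with
    | (left, lms, middle, _mrs, right) =>
      let eodn := nsDefault default_namespace
      match (if lms = some "=" then (eodn, left, middle)
             else if middle ≠ [] then (left, middle, right)
             else (eodn, left, ([] : List String))) with
      | (namespace_, name, value) =>
        let name := normalize_tag_part (PySem.Str.join "" name) kq
        if name = "" then ""
        else
          let namespace_ := normalize_tag_part (PySem.Str.join "" namespace_) kq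
          let value := normalize_tag_part (PySem.Str.join "" value) kq
          let name := if namespace_ ≠ "" then namespace_ ++ ":" ++ name else name
          if value ≠ "" then name ++ "=" ++ value else name

-- ===== PORT B =====
-- _skip_eq: drop the leading '=' tokens
def skipEq : List String → List String
  | [] => []
  | t :: ts => if t = "=" then skipEq ts else t :: ts

-- _finish: join, normalize and assemble the three parts
def finishTag (namespace_ name value : List String) (kq : List String) : String :=
  let name := normalize_tag_part (PySem.Str.join "" name) kq
  if name = "" then ""
  else
    let namespace_ := normalize_tag_part (PySem.Str.join "" namespace_) kq
    let value := normalize_tag_part (PySem.Str.join "" value) kq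
    let name := if namespace_ ≠ "" then namespace_ ++ ":" ++ name else name
    if value ≠ "" then name ++ "=" ++ value else name

def build_tag_alt (tokens : List String) (default_namespace : Option String) (keep_quotes : Option (List String)) : String :=
  let kq := keep_quotes.getD []
  if ¬ tokens.contains ":" ∧ ¬ tokens.contains "=" then
    let word := normalize_tag_part (PySem.Str.join "" tokens) kq
    if word ≠ "" ∧ truthyStrOpt default_namespace then
      (default_namespace.getD "") ++ ":" ++ word
    else word
  else
    let nsParts := nsDefault default_namespace
    let body := skipEq tokens
    let big := body.length + 1
    -- 'body.index(x) if x in body else big'; slices at nonnegative indices are take/drop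
    let ci := if body.contains ":" then body.idxOf ":" else big
    let ei := if body.contains "=" then body.idxOf "=" else big
    if ci < ei then
      let left := body.take ci
      let tbody := skipEq (body.drop (ci + 1))
      if tbody ≠ [] then
        let mi := if tbody.contains "=" then tbody.idxOf "=" else tbody.length
        finishTag left (tbody.take mi) (tbody.drop (mi + 1)) kq
      else finishTag nsParts left [] kq
    else if ei < big then finishTag nsParts (body.take ei) (body.drop (ei + 1)) kq
    else finishTag nsParts body [] kq

-- ===== PRECONDITION & SPEC =====
def Spec_build_tag (tokens : List String) (default_namespace : Option String) (keep_quotes : Option (List String)) (out : String) : Prop := out = build_tag_alt tokens default_namespace keep_quotes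
instance (tokens : List String) (default_namespace : Option String) (keep_quotes : Option (List String)) (out : String) : Decidable (Spec_build_tag tokens default_namespace keep_quotes out) := by unfold Spec_build_tag; infer_instance

-- ===== CLAIM (what is proved, stated in full; the proofs are below) =====
def Claim_equal_build_tag : Prop := ∀ (tokens : List String) (default_namespace : Option String) (keep_quotes : Option (List String)), Dom_build_tag tokens default_namespace keep_quotes → Spec_build_tag tokens default_namespace keep_quotes (build_tag tokens default_namespace keep_quotes)

-- ===== LEMMAS AND PROOFS =====

theorem skipEq_head_ne (ts : List String) {c : String} {rest : List String}
    (h : skipEq ts = c :: rest) : c ≠ "=" := by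
  induction ts with
  | nil => simp [skipEq] at h
  | cons t ts ih =>
    by_cases ht : t = "="
    · exact ih (by simpa [skipEq, ht] using h)
    · simp [skipEq, ht] at h
      exact h.1 ▸ ht

theorem foldl_stepA_skipEq (ts : List String) :
    ts.foldl stepA ([], none, [], none, []) = (skipEq ts).foldl stepA ([], none, [], none, []) := by
  induction ts with
  | nil => rfl
  | cons t ts ih =>
    by_cases h : t = "="
    · subst h; simpa [stepA, skipEq] using ih
    · simp [skipEq, h]

theorem foldl_stepA_eqphase (ts : List String) (L m : List String) :
    ts.foldl stepA (L, some "=", m, none, []) = (L, some "=", m ++ ts, none, []) := by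
  induction ts generalizing m with
  | nil => simp
  | cons t ts ih => simpa [stepA] using ih (m ++ [t])

theorem foldl_stepA_right (ts : List String) (L m r : List String) :
    ts.foldl stepA (L, some ":", m, some "=", r) = (L, some ":", m, some "=", r ++ ts) := by
  induction ts generalizing r with
  | nil => simp
  | cons t ts ih => simpa [stepA] using ih (r ++ [t])

theorem foldl_stepA_colon_skipEq (ts : List String) (L : List String) :
    ts.foldl stepA (L, some ":", [], none, []) = (skipEq ts).foldl stepA (L, some ":", [], none, []) := by
  induction ts with
  | nil => rfl
  | cons t ts ih =>
    by_cases h : t = "="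
    · subst h; simpa [stepA, skipEq] using ih
    · simp [skipEq, h]

theorem foldl_stepA_colon (ts : List String) (L m : List String) (hm : m ≠ []) :
    ts.foldl stepA (L, some ":", m, none, []) =
      (L, some ":", m ++ ts.take (if ("=" : String) ∈ ts then ts.idxOf "=" else ts.length),
       (if ("=" : String) ∈ ts then some "=" else none),
       ts.drop ((if ("=" : String) ∈ ts then ts.idxOf "=" else ts.length) + 1)) := by
  induction ts generalizing m with
  | nil => simp
  | cons t ts ih =>
    by_cases h : t = "="
    · subst h
      have hstep : stepA (L, some ":", m, none, []) "=" = (L, some ":", m, some "=", []) := by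
        simp [stepA, hm]
      rw [List.foldl_cons, hstep, foldl_stepA_right]
      simp [List.idxOf_cons]
    · have h' : ¬(("=" : String) = t) := fun e => h e.symm
      have hstep : stepA (L, some ":", m, none, []) t = (L, some ":", m ++ [t], none, []) := by
        simp [stepA, h]
      rw [List.foldl_cons, hstep, ih (m ++ [t]) (by simp)]
      by_cases hc : ("=" : String) ∈ ts <;>
        simp [List.idxOf_cons, hc, h, h', List.take_succ_cons, List.drop_succ_cons]

theorem foldl_stepA_left (ts : List String) (L : List String) (hL : L ≠ []) :
    ts.foldl stepA (L, none, [], none, []) =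
      (if (if (":" : String) ∈ ts then ts.idxOf ":" else ts.length + 1) <
          (if ("=" : String) ∈ ts then ts.idxOf "=" else ts.length + 1) then
        (ts.drop ((if (":" : String) ∈ ts then ts.idxOf ":" else ts.length + 1) + 1)).foldl stepA
          (L ++ ts.take (if (":" : String) ∈ ts then ts.idxOf ":" else ts.length + 1), some ":", [], none, [])
      else if (if ("=" : String) ∈ ts then ts.idxOf "=" else ts.length + 1) < ts.length + 1 then
        (L ++ ts.take (if ("=" : String) ∈ ts then ts.idxOf "=" else ts.length + 1), some "=",
         ts.drop ((if ("=" : String) ∈ ts then ts.idxOf "=" else ts.length + 1) + 1), none, [])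
      else (L ++ ts, none, [], none, [])) := by
  induction ts generalizing L with
  | nil => simp
  | cons t ts ih =>
    by_cases hcl : t = ":"
    · subst hcl
      have hstep : stepA (L, none, [], none, []) ":" = (L, some ":", [], none, []) := by
        simp [stepA]
      rw [List.foldl_cons, hstep]
      by_cases hc : ("=" : String) ∈ ts <;>
        simp [List.idxOf_cons, hc, List.drop_succ_cons]
    · by_cases heq : t = "="
      · subst heq
        have hstep : stepA (L, none, [], none, []) "=" = (L, some "=", [], none, []) := by
          simp [stepA, hL]
        rw [List.foldl_cons, hstep, foldl_stepA_eqphase]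
        by_cases hc : (":" : String) ∈ ts <;>
          simp [List.idxOf_cons, hc, List.drop_succ_cons]
      · have h1 : ¬((":" : String) = t) := fun e => hcl e.symm
        have h2 : ¬(("=" : String) = t) := fun e => heq e.symm
        have hstep : stepA (L, none, [], none, []) t = (L ++ [t], none, [], none, []) := by
          simp [stepA, hcl, heq]
        rw [List.foldl_cons, hstep, ih (L ++ [t]) (by simp)]
        clear ih hstep
        by_cases hc1 : (":" : String) ∈ ts <;> by_cases hc2 : ("=" : String) ∈ ts <;>
          · simp only [List.mem_cons, List.idxOf_cons, List.length_cons, hc1, hc2, h1, h2,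
              hcl, heq, or_false, or_true, false_or, iff_false, beq_iff_eq, Bool.cond_eq_ite,
              if_false, if_true, List.take_succ_cons, List.drop_succ_cons]
            split_ifs <;> try omega
            all_goals simp [List.append_assoc]


theorem phase2_result (tail L : List String) :
    tail.foldl stepA (L, some ":", [], none, []) =
      (match skipEq tail with
       | [] => (L, some ":", ([] : List String), (none : Option String), ([] : List String))
       | w :: ws =>
         (L, some ":", w :: ws.take (if ("=" : String) ∈ ws then ws.idxOf "=" else ws.length),
          (if ("=" : String) ∈ ws then some "=" else none),
          ws.drop ((if ("=" : String) ∈ ws then ws.idxOf "=" else ws.length) + 1))) := by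
  rw [foldl_stepA_colon_skipEq]
  rcases htb : skipEq tail with _ | ⟨w, ws⟩
  · rfl
  · have hw : w ≠ "=" := skipEq_head_ne tail htb
    have hstep : stepA (L, some ":", [], none, []) w = (L, some ":", [w], none, []) := by
      simp [stepA, hw]
    rw [List.foldl_cons, hstep, foldl_stepA_colon ws L [w] (by simp)]
    simp

-- the (namespace, name, value) selection of A, resp. of B
def tripleA (st : TagSt) (eodn : List String) : List String × List String × List String :=
  match st with
  | (left, lms, middle, _mrs, right) =>
    if lms = some "=" then (eodn, left, middle)
    else if middle ≠ [] then (left, middle, right)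
    else (eodn, left, [])

def tripleB (tokens : List String) (eodn : List String) : List String × List String × List String :=
  let body := skipEq tokens
  let big := body.length + 1
  let ci := if body.contains ":" then body.idxOf ":" else big
  let ei := if body.contains "=" then body.idxOf "=" else big
  if ci < ei then
    let left := body.take ci
    let tbody := skipEq (body.drop (ci + 1))
    if tbody ≠ [] then
      let mi := if tbody.contains "=" then tbody.idxOf "=" else tbody.length
      (left, tbody.take mi, tbody.drop (mi + 1))
    else (eodn, left, [])
  else if ei < big then (eodn, body.take ei, body.drop (ei + 1))
  else (eodn, body, [])

theorem build_tag_eq_finish (tokens : List String) (dn : Option String) (kq : Option (List String))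
    (h : ¬ (¬ tokens.contains ":" = true ∧ ¬ tokens.contains "=" = true)) :
    build_tag tokens dn kq =
      finishTag (tripleA (tokens.foldl stepA ([], none, [], none, [])) (nsDefault dn)).1
        (tripleA (tokens.foldl stepA ([], none, [], none, [])) (nsDefault dn)).2.1
        (tripleA (tokens.foldl stepA ([], none, [], none, [])) (nsDefault dn)).2.2 (kq.getD []) := by
  rcases hst : tokens.foldl stepA ([], none, [], none, []) with ⟨l, lms, m, mrs, r⟩
  simp only [build_tag, if_neg h, hst, tripleA, finishTag]
  try split_ifs <;> rfl

theorem alt_eq_finish (tokens : List String) (dn : Option String) (kq : Option (List String))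
    (h : ¬ (¬ tokens.contains ":" = true ∧ ¬ tokens.contains "=" = true)) :
    build_tag_alt tokens dn kq =
      finishTag (tripleB tokens (nsDefault dn)).1 (tripleB tokens (nsDefault dn)).2.1
        (tripleB tokens (nsDefault dn)).2.2 (kq.getD []) := by
  simp only [build_tag_alt, if_neg h, tripleB]
  split_ifs <;> rfl

theorem triple_eq (tokens : List String) (eodn : List String) :
    tripleA (tokens.foldl stepA ([], none, [], none, [])) eodn = tripleB tokens eodn := by
  rw [foldl_stepA_skipEq]
  simp only [tripleB]
  rcases hbody : skipEq tokens with _ | ⟨c, rest⟩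
  · simp [tripleA]
  · have hc : c ≠ "=" := skipEq_head_ne tokens hbody
    by_cases hcc : c = ":"
    · subst hcc
      have hstep : stepA ([], none, [], none, []) ":" = ([], some ":", [], none, []) := by
        simp [stepA]
      rw [List.foldl_cons, hstep, phase2_result]
      rcases htb : skipEq rest with _ | ⟨w, ws⟩
      · by_cases hce : ("=" : String) ∈ rest <;>
          simp [tripleA, List.idxOf_cons, hce, htb]
      · have hw : w ≠ "=" := skipEq_head_ne rest htb
        by_cases hce : ("=" : String) ∈ rest <;> by_cases hws : ("=" : String) ∈ ws <;>
          simp [tripleA, List.idxOf_cons, hce, hws, hw, htb, List.take_succ_cons,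
            List.drop_succ_cons]
    · have hstep : stepA ([], none, [], none, []) c = ([c], none, [], none, []) := by
        simp [stepA, hc, hcc]
      rw [List.foldl_cons, hstep, foldl_stepA_left rest [c] (by simp)]
      have h1 : ¬((":" : String) = c) := fun e => hcc e.symm
      have h2 : ¬(("=" : String) = c) := fun e => hc e.symm
      have hb1 : rest.idxOf ":" ≤ rest.length := List.idxOf_le_length
      have hb2 : rest.idxOf "=" ≤ rest.length := List.idxOf_le_length
      by_cases hc1 : (":" : String) ∈ rest <;> by_cases hc2 : ("=" : String) ∈ rest
      all_goals
        simp only [List.mem_cons, List.idxOf_cons, List.length_cons, List.contains_cons,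
          hc1, hc2, h1, h2, hcc, hc, or_false, or_true, false_or, iff_false, beq_iff_eq,
          Bool.or_eq_true, Bool.cond_eq_ite, if_false, if_true, List.take_succ_cons,
          List.drop_succ_cons, decide_eq_true_eq, List.elem_eq_contains, List.contains_eq_mem]
      -- (:∈, =∈)
      · by_cases hlt : rest.idxOf ":" < rest.idxOf "="
        · rw [if_pos hlt, if_pos (by omega), phase2_result]
          rcases htb : skipEq (rest.drop (rest.idxOf ":" + 1)) with _ | ⟨w, ws⟩
          · simp [htb, tripleA]
          · have hw : w ≠ "=" := skipEq_head_ne _ htb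
            by_cases hws : ("=" : String) ∈ ws <;>
              simp [htb, tripleA, List.idxOf_cons, hws, hw, List.take_succ_cons,
                List.drop_succ_cons]
        · have hlt2 : rest.idxOf "=" < rest.length + 1 :=
            Nat.lt_succ_of_lt (List.idxOf_lt_length_of_mem hc2)
          rw [if_neg hlt, if_pos hlt2, if_neg (by omega), if_pos (by omega)]
          simp [tripleA]
      -- (:∈, =∉)
      · have hlt : rest.idxOf ":" < rest.length + 1 :=
          Nat.lt_succ_of_lt (List.idxOf_lt_length_of_mem hc1)
        rw [if_pos hlt, if_pos (by omega), phase2_result]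
        rcases htb : skipEq (rest.drop (rest.idxOf ":" + 1)) with _ | ⟨w, ws⟩
        · simp [htb, tripleA]
        · have hw : w ≠ "=" := skipEq_head_ne _ htb
          by_cases hws : ("=" : String) ∈ ws <;>
            simp [htb, tripleA, List.idxOf_cons, hws, hw, List.take_succ_cons,
              List.drop_succ_cons]
      -- (:∉, =∈)
      · have hlt2 : rest.idxOf "=" < rest.length + 1 :=
          Nat.lt_succ_of_lt (List.idxOf_lt_length_of_mem hc2)
        rw [if_neg (by omega), if_pos hlt2, if_neg (by omega), if_pos (by omega)]
        simp [tripleA]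
      -- (:∉, =∉)
      · rw [if_neg (by omega), if_neg (by omega), if_neg (by omega), if_neg (by omega)]
        simp [tripleA]

theorem build_tag_eq_alt (tokens : List String) (dn : Option String) (kq : Option (List String)) :
    build_tag tokens dn kq = build_tag_alt tokens dn kq := by
  by_cases hf : ¬ tokens.contains ":" = true ∧ ¬ tokens.contains "=" = true
  · simp only [build_tag, build_tag_alt, if_pos hf]
  · rw [build_tag_eq_finish tokens dn kq hf, alt_eq_finish tokens dn kq hf, triple_eq]

-- ===== VERDICT (by name: the statement is the Claim_ definition above) =====
theorem build_tag_spec : Claim_equal_build_tag := by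
  intro tokens dn kq _
  unfold Spec_build_tag
  exact build_tag_eq_alt tokens dn kq
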